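-- pv_equiv track=rewrite | github.com/thekozugroup/RLang | dataset/optimize_traces.py | optimize_merge_observations
-- ===== SOURCE A (Python) =====
-- def optimize_merge_observations(text: str) -> tuple[str, int]:
--     """Merge consecutive observation let-bindings by removing blank lines between them.
--
--     Returns (optimized_text, count_of_merges).
--     """
--     # Remove blank lines between consecutive let statements in Frame phase
--     lines = text.split("\n")
--     result = []
--     merges = 0
--     in_frame = False
--     prev_was_let = False
--
--     for line in lines:
--         stripped = line.strip()
--
--         if "#[phase(Frame)]" in stripped:
--             in_frame = True
--         elif "#[phase(" in stripped and "Frame" not in stripped: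
--             in_frame = False
--
--         if in_frame:
--             is_let = stripped.startswith("let ") and "=" in stripped
--             if prev_was_let and stripped == "":
--                 # Skip blank line between consecutive lets
--                 merges += 1
--                 continue
--             prev_was_let = is_let
--         else:
--             prev_was_let = False
--
--         result.append(line)
--
--     return "\n".join(result), merges
-- ===== SOURCE B (Python) =====
-- def optimize_merge_observations(text: str) -> tuple[str, int]:
--     """Merge consecutive observation let-bindings by removing blank lines between them.
--
--     Two-pass version: first annotate every line with its Frame-phase status,
--     then filter the annotated records with a single carry flag.
--     Returns (optimized_text, count_of_merges).
--     """
--     # Pass 1: annotate each line with (line, in_frame, is_blank, is_let).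
--     records = []
--     in_frame = False
--     for line in text.split("\n"):
--         stripped = line.strip()
--         if "#[phase(Frame)]" in stripped:
--             in_frame = True
--         elif "#[phase(" in stripped and "Frame" not in stripped:
--             in_frame = False
--         records.append((line,
--                         in_frame,
--                         stripped == "",
--                         stripped.startswith("let ") and "=" in stripped))
--
--     # Pass 2: drop blank frame lines that follow a kept frame let-binding.
--     kept = []
--     merges = 0
--     last_kept_was_frame_let = False
--     for line, inf, blank, is_let in records:
--         if inf and blank and last_kept_was_frame_let:
--             merges += 1
--         else:
--             kept.append(line)
--             last_kept_was_frame_let = inf and is_let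
--     return "\n".join(kept), merges
-- ===== Notes on version B (the rewrite author's own statement) =====
-- stated objective: alternative
-- what changed: Replaces A's single fused loop by a two-pass pipeline: a first pass annotates every line with (in_frame, is_blank, is_let) records, and a second pass filters the records with one carry flag and counts the merges.
import Mathlib
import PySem

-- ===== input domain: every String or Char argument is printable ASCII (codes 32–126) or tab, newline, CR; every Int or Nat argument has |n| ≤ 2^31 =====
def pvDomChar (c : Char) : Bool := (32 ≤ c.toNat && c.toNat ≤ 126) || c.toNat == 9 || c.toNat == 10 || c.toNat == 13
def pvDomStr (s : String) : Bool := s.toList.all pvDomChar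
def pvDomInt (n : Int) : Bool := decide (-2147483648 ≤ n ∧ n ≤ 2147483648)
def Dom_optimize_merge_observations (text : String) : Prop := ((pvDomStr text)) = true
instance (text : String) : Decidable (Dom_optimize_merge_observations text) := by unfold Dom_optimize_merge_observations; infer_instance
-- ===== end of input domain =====

-- B replaces A's single fused loop by a two-pass pipeline (annotate records, then filter
-- with one carry flag); same cost, different decomposition (objective: alternative).


-- ===== PORT A =====
-- A's single loop: state (result, merges, in_frame, prev_was_let), appending kept lines.
def pvLoopA (lines : List String) (res : List String) (merges : Int)
    (inf prev : Bool) : List String × Int :=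
  match lines with
  | [] => (res, merges)
  | line :: rest =>
    let s := PySem.Str.strip line
    let inf' := if PySem.Str.isIn "#[phase(Frame)]" s then true
      else if PySem.Str.isIn "#[phase(" s && !(PySem.Str.isIn "Frame" s) then false
      else inf
    if inf' then
      if prev && (s == "") then
        pvLoopA rest res (merges + 1) inf' prev
      else
        pvLoopA rest (res ++ [line]) merges inf'
          (PySem.Str.startswith s "let " && PySem.Str.isIn "=" s)
    else
      pvLoopA rest (res ++ [line]) merges inf' false

def optimize_merge_observations (text : String) : String × Int :=
  let r := pvLoopA (((PySem.Str.split? text "\n").getD [])) [] 0 false false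
  (PySem.Str.join "\n" r.1, r.2)

-- ===== PORT B =====
-- Pass 1: annotate each line with (line, in_frame, is_blank, is_let).
def pvAnnotB (inf : Bool) : List String → List (String × Bool × Bool × Bool)
  | [] => []
  | line :: rest =>
    let s := PySem.Str.strip line
    let inf' := if PySem.Str.isIn "#[phase(Frame)]" s then true
      else if PySem.Str.isIn "#[phase(" s && !(PySem.Str.isIn "Frame" s) then false
      else inf
    (line, inf', s == "", PySem.Str.startswith s "let " && PySem.Str.isIn "=" s)
      :: pvAnnotB inf' rest

-- Pass 2: filter the records with the single carry flag, counting merges.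
def pvPassB (flag : Bool) (kept : List String) (merges : Int) :
    List (String × Bool × Bool × Bool) → List String × Int
  | [] => (kept, merges)
  | (line, inf, blank, islet) :: rest =>
    if inf && blank && flag then pvPassB flag kept (merges + 1) rest
    else pvPassB (inf && islet) (kept ++ [line]) merges rest

def optimize_merge_observations_alt (text : String) : String × Int :=
  let recs := pvAnnotB false (((PySem.Str.split? text "\n").getD []))
  let r := pvPassB false [] 0 recs
  (PySem.Str.join "\n" r.1, r.2)

-- ===== PRECONDITION & SPEC =====
def Spec_optimize_merge_observations (text : String) (out : String × Int) : Prop := out = optimize_merge_observations_alt text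
instance (text : String) (out : String × Int) : Decidable (Spec_optimize_merge_observations text out) := by unfold Spec_optimize_merge_observations; infer_instance

-- ===== CLAIM (what is proved, stated in full; the proofs are below) =====
def Claim_equal_optimize_merge_observations : Prop := ∀ (text : String), Dom_optimize_merge_observations text → Spec_optimize_merge_observations text (optimize_merge_observations text)

-- ===== LEMMAS AND PROOFS =====
theorem pvLoopA_eq_passB (lines : List String) :
    ∀ (res : List String) (m : Int) (inf prev : Bool),
      pvLoopA lines res m inf prev = pvPassB prev res m (pvAnnotB inf lines) := by
  induction lines with
  | nil => intro res m inf prev; rfl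
  | cons line rest ih =>
    intro res m inf prev
    simp only [pvLoopA, pvAnnotB, pvPassB]
    cases hinf' : (if PySem.Str.isIn "#[phase(Frame)]" (PySem.Str.strip line) then true
      else if PySem.Str.isIn "#[phase(" (PySem.Str.strip line) &&
          !(PySem.Str.isIn "Frame" (PySem.Str.strip line)) then false else inf) with
    | false => simp [ih]
    | true =>
      cases prev <;> cases hblank : (PySem.Str.strip line == "") <;> simp [ih]

-- ===== VERDICT (by name: the statement is the Claim_ definition above) =====
theorem optimize_merge_observations_spec : Claim_equal_optimize_merge_observations := by
  intro text _
  unfold Spec_optimize_merge_observations optimize_merge_observations optimize_merge_observations_alt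
  simp [pvLoopA_eq_passB]
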